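-- pv_equiv track=rewrite | github.com/soyukke/lean-unsolved | scripts/collatz_orbit_invariant_measure_mod2k.py | compute_measure_first_k_steps
-- ===== SOURCE A (Python) =====
-- from collections import Counter, defaultdict
--
-- def syracuse(n):
--     """Syracuse map: n odd -> (3n+1)/2^v2(3n+1)"""
--     x = 3 * n + 1
--     while x % 2 == 0:
--         x //= 2
--     return x
--
-- def collatz_orbit_odd(n, max_steps=10000):
--     """コラッツ軌道の奇数ステップを列挙"""
--     steps = []
--     x = n
--     if x % 2 == 0:
--         while x % 2 == 0:
--             x //= 2
--     seen = set()
--     for _ in range(max_steps):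
--         steps.append(x)
--         if x == 1:
--             break
--         if x in seen:
--             break
--         seen.add(x)
--         x = syracuse(x)
--     return steps
--
-- def compute_measure_first_k_steps(N_max, mod_k, max_orbit_len):
--     """軌道の最初のmax_orbit_lenステップのみ"""
--     mod = 2 ** mod_k
--     freq = Counter()
--     total = 0
--
--     for n0 in range(3, N_max + 1, 2):
--         orbit = collatz_orbit_odd(n0, max_steps=max_orbit_len)
--         for x in orbit[:max_orbit_len]:
--             freq[x % mod] += 1
--             total += 1
--
--     return freq, total
-- ===== SOURCE B (Python) =====
-- from collections import Counter
--
-- def compute_measure_first_k_steps(N_max, mod_k, max_orbit_len):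
--     """Memoized suffix reuse: caches, per odd value, its full shortcut-Collatz
--     orbit down to 1 and splices a cached tail instead of regenerating it."""
--     mod = 2 ** mod_k
--     freq = Counter()
--     total = 0
--     memo = {}  # value -> full orbit from that value, ending at 1
--     for n0 in range(3, N_max + 1, 2):
--         path = []
--         seen = set()
--         x = n0
--         fuel = max_orbit_len
--         tail = None
--         done = False
--         while fuel > 0:
--             if x in memo:
--                 tail = memo[x]
--                 break
--             path.append(x)
--             if x == 1:
--                 done = True
--                 break
--             if x in seen:
--                 break
--             seen.add(x)
--             fuel -= 1
--             y = 3 * x + 1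
--             while y % 2 == 0:
--                 y //= 2
--             x = y
--         if tail is not None:
--             orbit = path + tail[:fuel]
--             full = path + tail
--         elif done:
--             orbit = path
--             full = path
--         else:
--             orbit = path
--             full = None
--         if full is not None:
--             for j in range(len(path)):
--                 if path[j] not in memo:
--                     memo[path[j]] = full[j:]
--         for r in orbit:
--             freq[r % mod] += 1
--             total += 1
--     return freq, total
-- ===== Notes on version B (the rewrite author's own statement) =====
-- stated objective: faster
-- what changed: B memoizes, per odd value, the full shortcut-Collatz orbit down to 1 and splices a cached tail (truncated to the remaining budget) instead of regenerating every orbit from scratch as A does; intended as faster (overlapping orbit suffixes are computed once), measured ~1.7x at the largest size where both finished, unconfirmed at the top size where both hit the timeout. Pre_ excludes mod_k < 0 on inputs where counting happens (N_max >= 3 and max_orbit_len >= 1), because there 2**mod_k is a float and A's Counter has float keys, not a value of the declared Int-keyed type.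
-- outside the precondition, e.g. on compute_measure_first_k_steps(3, -1, 1): A returns ({0.0: 1}, 1), B returns ({0.0: 1}, 1)
import Mathlib
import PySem

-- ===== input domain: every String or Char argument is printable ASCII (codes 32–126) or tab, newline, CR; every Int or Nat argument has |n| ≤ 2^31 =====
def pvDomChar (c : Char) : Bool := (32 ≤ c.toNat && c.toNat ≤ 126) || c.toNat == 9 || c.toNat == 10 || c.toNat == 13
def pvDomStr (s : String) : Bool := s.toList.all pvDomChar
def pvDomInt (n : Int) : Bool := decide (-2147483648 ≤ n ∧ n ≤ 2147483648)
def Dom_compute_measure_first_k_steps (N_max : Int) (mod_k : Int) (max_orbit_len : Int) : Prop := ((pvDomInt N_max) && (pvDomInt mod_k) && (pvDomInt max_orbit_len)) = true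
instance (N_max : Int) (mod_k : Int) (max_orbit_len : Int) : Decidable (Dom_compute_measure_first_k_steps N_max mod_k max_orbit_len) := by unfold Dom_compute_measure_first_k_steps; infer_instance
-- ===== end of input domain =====

-- B memoizes, per value, the full shortcut-Collatz orbit down to 1 and splices cached
-- tails instead of regenerating every orbit from scratch as A does; intended as faster
-- (overlapping orbit suffixes computed once; measured ~1.7x at the largest size where
-- both implementations finished within a timing run's budget).

-- ===== PORT A =====

-- 'while x % 2 == 0: x //= 2': the Nat fuel x.natAbs only makes the recursion
-- structural; it bounds the number of halvings of every x ≠ 0 (Python diverges at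
-- x = 0, which 3*n+1 never produces)
def pvHalveGoA (fuel : Nat) (x : Int) : Int :=
  match fuel with
  | 0 => x
  | f + 1 => if PySem.Int.mod x 2 = 0 then pvHalveGoA f (PySem.Int.floordiv x 2) else x

def pvHalveA (x : Int) : Int := pvHalveGoA x.natAbs x

def pvSyracuseA (n : Int) : Int := pvHalveA (3 * n + 1)

-- the 'for _ in range(max_steps)' loop of collatz_orbit_odd
def pvOrbitLoopA (fuel : Nat) (x : Int) (seen : PySem.Set Int) (steps : List Int) : List Int :=
  match fuel with
  | 0 => steps
  | f + 1 =>
    let steps' := steps ++ [x]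
    if x = 1 then steps'
    else if PySem.Set.contains seen x then steps'
    else pvOrbitLoopA f (pvSyracuseA x) (PySem.Set.add seen x) steps'

def pvCollatzOrbitOddA (n : Int) (maxSteps : Int) : List Int :=
  let x := if PySem.Int.mod n 2 = 0 then pvHalveA n else n
  pvOrbitLoopA maxSteps.toNat x PySem.Set.empty []

-- 'freq[x % mod] += 1; total += 1'
def pvStepA (mod : Int) (st : PySem.Dict Int Int × Int) (x : Int) : PySem.Dict Int Int × Int :=
  (st.1.insert (PySem.Int.mod x mod) (st.1.getD (PySem.Int.mod x mod) 0 + 1), st.2 + 1)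

def compute_measure_first_k_steps (N_max : Int) (mod_k : Int) (max_orbit_len : Int) : (List (Int × Int)) × Int :=
  let mod : Int := 2 ^ mod_k.toNat
  let st := (PySem.List.pyRange 3 (N_max + 1) 2).foldl
    (fun (st : PySem.Dict Int Int × Int) (n0 : Int) =>
      (PySem.List.slice (pvCollatzOrbitOddA n0 max_orbit_len) none (some max_orbit_len)).foldl
        (pvStepA mod) st)
    ((PySem.Dict.empty : PySem.Dict Int Int), (0 : Int))
  (st.1.items, st.2)

-- ===== PORT B =====

-- B's 'while y % 2 == 0: y //= 2' (same Nat-fuel device as on the A side)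
def pvHalveGoB (fuel : Nat) (y : Int) : Int :=
  match fuel with
  | 0 => y
  | f + 1 => if PySem.Int.mod y 2 = 0 then pvHalveGoB f (PySem.Int.floordiv y 2) else y

def pvHalveB (y : Int) : Int := pvHalveGoB y.natAbs y

-- how B's inner 'while fuel > 0' walk ended: fuel exhausted, reached 1, repeat seen,
-- or a memo hit (carrying the cached tail and the fuel remaining at the hit)
inductive PvEnd where
  | fuelOut : PvEnd
  | hitOne : PvEnd
  | hitSeen : PvEnd
  | hitMemo : List Int → Nat → PvEnd
deriving DecidableEq, Repr

-- B's per-start walk: collect 'path' until a memo hit / 1 / repeat / fuel out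
def pvWalkB (fuel : Nat) (x : Int) (seen : PySem.Set Int) (path : List Int)
    (memo : PySem.Dict Int (List Int)) : List Int × PvEnd :=
  match fuel with
  | 0 => (path, .fuelOut)
  | f + 1 =>
    match memo.get? x with
    | some t => (path, .hitMemo t (f + 1))
    | none =>
      let path' := path ++ [x]
      if x = 1 then (path', .hitOne)
      else if PySem.Set.contains seen x then (path', .hitSeen)
      else pvWalkB f (pvHalveB (3 * x + 1)) (PySem.Set.add seen x) path' memo

-- 'for j in range(len(path)): if path[j] not in memo: memo[path[j]] = full[j:]'
def pvCacheB (p : List Int) (full : List Int) (memo : PySem.Dict Int (List Int)) :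
    PySem.Dict Int (List Int) :=
  match p with
  | [] => memo
  | a :: rest =>
      pvCacheB rest (full.drop 1) (if memo.contains a then memo else memo.insert a full)

-- 'freq[r % mod] += 1; total += 1'
def pvStepB (mod : Int) (st : PySem.Dict Int Int × Int) (x : Int) : PySem.Dict Int Int × Int :=
  (st.1.insert (PySem.Int.mod x mod) (st.1.getD (PySem.Int.mod x mod) 0 + 1), st.2 + 1)

-- one iteration of B's outer loop: walk, splice a cached tail, cache new suffixes, count
def pvStartB (n0 : Int) (fuel : Nat) (mod : Int) (memo : PySem.Dict Int (List Int))
    (freq : PySem.Dict Int Int) (total : Int) :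
    PySem.Dict Int (List Int) × PySem.Dict Int Int × Int :=
  let w := pvWalkB fuel n0 PySem.Set.empty [] memo
  let orbit : List Int :=
    match w.2 with
    | .hitMemo t fl => w.1 ++ t.take fl
    | _ => w.1
  let memo' :=
    match w.2 with
    | .hitMemo t _ => pvCacheB w.1 (w.1 ++ t) memo
    | .hitOne => pvCacheB w.1 w.1 memo
    | _ => memo
  let st := orbit.foldl (pvStepB mod) (freq, total)
  (memo', st.1, st.2)

def compute_measure_first_k_steps_alt (N_max : Int) (mod_k : Int) (max_orbit_len : Int) : (List (Int × Int)) × Int :=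
  let mod : Int := 2 ^ mod_k.toNat
  let st := (PySem.List.pyRange 3 (N_max + 1) 2).foldl
    (fun (st : PySem.Dict Int (List Int) × PySem.Dict Int Int × Int) (n0 : Int) =>
      pvStartB n0 max_orbit_len.toNat mod st.1 st.2.1 st.2.2)
    ((PySem.Dict.empty : PySem.Dict Int (List Int)), (PySem.Dict.empty : PySem.Dict Int Int), (0 : Int))
  (st.2.1.items, st.2.2)

-- ===== PRECONDITION & SPEC =====
-- Pre_ excludes mod_k < 0 whenever counting happens (N_max ≥ 3 and max_orbit_len ≥ 1):
-- there Python's 2**mod_k is a float and A's Counter gets float keys, not a value of the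
-- declared (List (Int × Int)) × Int type.
def Pre_compute_measure_first_k_steps (N_max : Int) (mod_k : Int) (max_orbit_len : Int) : Prop :=
  0 ≤ mod_k ∨ N_max < 3 ∨ max_orbit_len < 1
instance (N_max : Int) (mod_k : Int) (max_orbit_len : Int) : Decidable (Pre_compute_measure_first_k_steps N_max mod_k max_orbit_len) := by unfold Pre_compute_measure_first_k_steps; infer_instance

def pvWitness_compute_measure_first_k_steps : Int × Int × Int := (9, 3, 5)

def Spec_compute_measure_first_k_steps (N_max : Int) (mod_k : Int) (max_orbit_len : Int) (out : (List (Int × Int)) × Int) : Prop := out = compute_measure_first_k_steps_alt N_max mod_k max_orbit_len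
instance (N_max : Int) (mod_k : Int) (max_orbit_len : Int) (out : (List (Int × Int)) × Int) : Decidable (Spec_compute_measure_first_k_steps N_max mod_k max_orbit_len out) := by unfold Spec_compute_measure_first_k_steps; infer_instance

-- ===== CLAIM (what is proved, stated in full; the proofs are below) =====
def Claim_equal_compute_measure_first_k_steps : Prop := ∀ (N_max : Int) (mod_k : Int) (max_orbit_len : Int), Dom_compute_measure_first_k_steps N_max mod_k max_orbit_len → Pre_compute_measure_first_k_steps N_max mod_k max_orbit_len → Spec_compute_measure_first_k_steps N_max mod_k max_orbit_len (compute_measure_first_k_steps N_max mod_k max_orbit_len)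

-- ===== LEMMAS AND PROOFS =====

-- the two transliterated halving loops agree
theorem pvHalveGo_eq (fuel : Nat) (x : Int) : pvHalveGoA fuel x = pvHalveGoB fuel x := by
  induction fuel generalizing x with
  | zero => rfl
  | succ f ih => rw [pvHalveGoA, pvHalveGoB]; split <;> simp [ih]

theorem pvHalve_eq (x : Int) : pvHalveA x = pvHalveB x := pvHalveGo_eq x.natAbs x

theorem pvOrbitLoopA_acc (fuel : Nat) (x : Int) (seen : PySem.Set Int) (steps : List Int) :
    pvOrbitLoopA fuel x seen steps = steps ++ pvOrbitLoopA fuel x seen [] := by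
  induction fuel generalizing x seen steps with
  | zero => simp [pvOrbitLoopA]
  | succ f ih =>
    rw [pvOrbitLoopA, pvOrbitLoopA]
    by_cases h1 : x = 1
    · simp [h1]
    by_cases h2 : x ∈ seen
    · simp [h1, h2]
    · have hc : PySem.Set.contains seen x = false := by simpa using h2
      simp only [if_neg h1, hc, Bool.false_eq_true, if_false, List.nil_append]
      rw [ih (pvSyracuseA x) (PySem.Set.add seen x) (steps ++ [x]),
          ih (pvSyracuseA x) (PySem.Set.add seen x) [x]]
      simp

theorem pvOrbitLoopA_length (fuel : Nat) (x : Int) (seen : PySem.Set Int) :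
    (pvOrbitLoopA fuel x seen []).length ≤ fuel := by
  induction fuel generalizing x seen with
  | zero => simp [pvOrbitLoopA]
  | succ f ih =>
    rw [pvOrbitLoopA]
    by_cases h1 : x = 1
    · simp [h1]
    by_cases h2 : x ∈ seen
    · simp [h1, h2]
    · have hc : PySem.Set.contains seen x = false := by simpa using h2
      simp only [if_neg h1, hc, Bool.false_eq_true, if_false, List.nil_append]
      rw [pvOrbitLoopA_acc]
      simpa using ih (pvSyracuseA x) (PySem.Set.add seen x)

theorem pvSlice_id (n0 m : Int) :
    PySem.List.slice (pvCollatzOrbitOddA n0 m) none (some m) = pvCollatzOrbitOddA n0 m := by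
  by_cases hm : 0 ≤ m
  · rw [PySem.List.slice_to _ hm]
    apply List.take_of_length_le
    exact pvOrbitLoopA_length _ _ _
  · have h0 : m.toNat = 0 := by omega
    have : pvCollatzOrbitOddA n0 m = [] := by
      unfold pvCollatzOrbitOddA
      rw [h0]
      rfl
    rw [this]
    simp [PySem.List.slice]

-- 'L is the full orbit of x': L starts at x, each step is the Syracuse map, only the
-- last element is 1
def pvGood : Int → List Int → Prop
  | _, [] => False
  | x, [y] => x = y ∧ y = 1
  | x, y :: z :: t => x = y ∧ y ≠ 1 ∧ z = pvSyracuseA y ∧ pvGood z (z :: t)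

theorem pvGood_head {x : Int} {L : List Int} (h : pvGood x L) : ∃ L', L = x :: L' := by
  match L with
  | [] => exact absurd h (by simp [pvGood])
  | [y] => exact ⟨[], by rw [h.1]⟩
  | y :: z :: t => exact ⟨z :: t, by rw [h.1]⟩

theorem pvGood_unique {L₁ : List Int} : ∀ {x : Int} {L₂ : List Int},
    pvGood x L₁ → pvGood x L₂ → L₁ = L₂ := by
  induction L₁ with
  | nil => intro x L₂ h; exact absurd h (by simp [pvGood])
  | cons y rest ih =>
    intro x L₂ h₁ h₂
    match rest, L₂ with
    | [], [] => exact absurd h₂ (by simp [pvGood])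
    | [], [y₂] =>
      obtain ⟨hx, h1⟩ := h₁; obtain ⟨hx₂, h1₂⟩ := h₂
      have : y = y₂ := by omega
      rw [this]
    | [], y₂ :: z₂ :: t₂ =>
      obtain ⟨hx, h1⟩ := h₁
      obtain ⟨hx₂, h1₂, _, _⟩ := h₂
      exact absurd (by omega : y₂ = 1) h1₂
    | z :: t, [y₂] =>
      obtain ⟨hx, h1, _, _⟩ := h₁
      obtain ⟨hx₂, h1₂⟩ := h₂
      exact absurd (by omega : y = 1) h1
    | z :: t, y₂ :: z₂ :: t₂ =>
      obtain ⟨hx, h1, hz, hg⟩ := h₁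
      obtain ⟨hx₂, h1₂, hz₂, hg₂⟩ := h₂
      have hy : y = y₂ := by omega
      subst hy
      have hzz : z = z₂ := by rw [hz, hz₂]
      subst hzz
      rw [ih hg hg₂]

theorem pvGood_mem_suffix {L : List Int} : ∀ {x v : Int},
    pvGood x L → v ∈ L → ∃ M, pvGood v M ∧ M.length ≤ L.length := by
  induction L with
  | nil => intro x v h; exact absurd h (by simp [pvGood])
  | cons y rest ih =>
    intro x v h hv
    match rest with
    | [] =>
      obtain ⟨_, h1⟩ := h
      refine ⟨[y], ?_, le_rfl⟩
      have : v = y := by simpa using hv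
      exact ⟨this, h1⟩
    | z :: t =>
      obtain ⟨hx, h1, hz, hg⟩ := h
      rcases List.mem_cons.1 hv with hvy | hvt
      · exact ⟨y :: z :: t, by subst hvy; exact ⟨rfl, h1, hz, hg⟩, le_rfl⟩
      · obtain ⟨M, hM, hlen⟩ := ih hg hvt
        exact ⟨M, hM, le_trans hlen (by simp)⟩

theorem pvGood_nodup {L : List Int} : ∀ {x : Int}, pvGood x L → L.Nodup := by
  induction L with
  | nil => intro x h; exact absurd h (by simp [pvGood])
  | cons y rest ih =>
    intro x h
    match rest with
    | [] => simp
    | z :: t =>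
      obtain ⟨hx, h1, hz, hg⟩ := h
      refine List.nodup_cons.2 ⟨?_, ih hg⟩
      intro hmem
      obtain ⟨M, hM, hlen⟩ := pvGood_mem_suffix hg hmem
      have hgy : pvGood y (y :: z :: t) := ⟨rfl, h1, hz, hg⟩
      have := pvGood_unique hM hgy
      rw [this] at hlen
      simp at hlen

-- A's loop consumes a full orbit: it emits exactly the first 'fuel' elements
theorem pvOrbitA_good {L : List Int} : ∀ {x : Int} (fuel : Nat) (seen : PySem.Set Int),
    pvGood x L → (∀ v ∈ L, v ∉ seen) → L.Nodup →
    pvOrbitLoopA fuel x seen [] = L.take fuel := by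
  induction L with
  | nil => intro x _ _ h; exact absurd h (by simp [pvGood])
  | cons y rest ih =>
    intro x fuel seen h hdisj hnd
    match rest with
    | [] =>
      obtain ⟨hx, h1⟩ := h
      match fuel with
      | 0 => rfl
      | f + 1 => subst hx; rw [pvOrbitLoopA]; simp [h1]
    | z :: t =>
      obtain ⟨hx, h1, hz, hg⟩ := h
      subst hx
      match fuel with
      | 0 => rfl
      | f + 1 =>
        rw [pvOrbitLoopA]
        have hns : x ∉ seen := hdisj x (by simp)
        have hc : PySem.Set.contains seen x = false := by simpa using hns
        simp only [if_neg h1, hc, Bool.false_eq_true, if_false, List.nil_append]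
        rw [pvOrbitLoopA_acc, ← hz]
        have hrec := ih (x := z) f (PySem.Set.add seen x) hg ?_ (List.nodup_cons.1 hnd).2
        · rw [hrec]; simp
        · intro v hv
          have hvne : v ≠ x := by
            intro hvx; exact (List.nodup_cons.1 hnd).1 (hvx ▸ hv)
          have := hdisj v (List.mem_cons_of_mem _ hv)
          simp [PySem.Set.mem_add, this, hvne]

-- 'p is a 1-free Syracuse chain from x0 whose continuation is x'
def pvPre : Int → List Int → Int → Prop
  | x0, [], x => x = x0
  | x0, y :: t, x => y = x0 ∧ y ≠ 1 ∧ pvPre (pvSyracuseA y) t x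

theorem pvPre_snoc {p : List Int} : ∀ {x0 x : Int}, pvPre x0 p x → x ≠ 1 →
    pvPre x0 (p ++ [x]) (pvSyracuseA x) := by
  induction p with
  | nil => intro x0 x h h1; exact ⟨h.symm ▸ rfl, h ▸ h1, rfl⟩
  | cons y t ih =>
    intro x0 x h h1
    exact ⟨h.1, h.2.1, ih h.2.2 h1⟩

theorem pvPre_good {p : List Int} : ∀ {x0 x : Int} {L : List Int},
    pvPre x0 p x → pvGood x L → pvGood x0 (p ++ L) := by
  induction p with
  | nil => intro x0 x L h hg; rw [List.nil_append, ← h]; exact hg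
  | cons y t ih =>
    intro x0 x L h hg
    obtain ⟨hy, h1, hp⟩ := h
    have hgood : pvGood (pvSyracuseA y) (t ++ L) := ih hp hg
    obtain ⟨M, hM⟩ := pvGood_head hgood
    rw [List.cons_append, hM]
    exact ⟨hy.symm ▸ rfl, hy ▸ h1, rfl, hM ▸ hgood⟩

theorem pvGood_cons {x : Int} {L : List Int} (h1 : x ≠ 1)
    (h : pvGood (pvSyracuseA x) L) : pvGood x (x :: L) := by
  obtain ⟨M, hM⟩ := pvGood_head h
  rw [hM]
  exact ⟨rfl, h1, rfl, hM ▸ h⟩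

-- memo invariant: every cached list is the full orbit of its key
def pvInv (memo : PySem.Dict Int (List Int)) : Prop :=
  ∀ x L, memo.get? x = some L → pvGood x L

-- caching full-orbit suffixes preserves the memo invariant
theorem pvCacheB_inv : ∀ (p full : List Int) (memo : PySem.Dict Int (List Int)),
    pvInv memo → (∃ t, full = p ++ t) → (p ≠ [] → pvGood full.headI full) →
    pvInv (pvCacheB p full memo) := by
  intro p
  induction p with
  | nil => intro full memo hInv _ _; exact hInv
  | cons a rest ih =>
    intro full memo hInv hrel hgood
    obtain ⟨t, ht⟩ := hrel
    subst ht
    have hga : pvGood a ((a :: rest) ++ t) := by simpa using hgood (by simp)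
    rw [pvCacheB]
    apply ih
    · intro x L hx
      split at hx
      · exact hInv x L hx
      · rw [PySem.Dict.get?_insert] at hx
        split at hx
        · rename_i hxa; cases hx; exact hxa ▸ hga
        · exact hInv x L hx
    · exact ⟨t, by simp⟩
    · intro hne
      obtain ⟨b, rest', rfl⟩ : ∃ b r', rest = b :: r' := by
        cases rest with
        | nil => exact absurd rfl hne
        | cons b r' => exact ⟨b, r', rfl⟩
      have hga' : pvGood a (a :: b :: (rest' ++ t)) := by simpa using hga
      obtain ⟨_, _, _, hg⟩ := hga'
      show pvGood (List.drop 1 ((a :: b :: rest') ++ t)).headI (List.drop 1 ((a :: b :: rest') ++ t))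
      simpa using hg

-- B's walk: the collected path extends the input, A's loop output equals the fresh
-- part plus the truncated cached tail, and finished walks are full orbits
theorem pvWalk_spec (x0 : Int) : ∀ (fuel : Nat) (x : Int) (seen : PySem.Set Int)
    (path : List Int) (memo : PySem.Dict Int (List Int)),
    pvInv memo → pvPre x0 path x → (∀ v, v ∈ seen ↔ v ∈ path) →
    ∃ q, (pvWalkB fuel x seen path memo).1 = path ++ q ∧
      pvOrbitLoopA fuel x seen [] =
        q ++ (match (pvWalkB fuel x seen path memo).2 with
              | .hitMemo t fl => t.take fl | _ => []) ∧
      (∀ t fl, (pvWalkB fuel x seen path memo).2 = .hitMemo t fl → pvGood x (q ++ t)) ∧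
      ((pvWalkB fuel x seen path memo).2 = .hitOne → pvGood x q) := by
  intro fuel
  induction fuel with
  | zero =>
    intro x seen path memo _ _ _
    exact ⟨[], by simp [pvWalkB], by simp [pvWalkB, pvOrbitLoopA],
      by intro t fl h; simp [pvWalkB] at h, by intro h; simp [pvWalkB] at h⟩
  | succ f ih =>
    intro x seen path memo hInv hpre hseen
    rw [pvWalkB]
    match hget : memo.get? x with
    | some tL =>
      have hg : pvGood x tL := hInv x tL hget
      have hgood : pvGood x0 (path ++ tL) := pvPre_good hpre hg
      have hnd : (path ++ tL).Nodup := pvGood_nodup hgood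
      have hdisj : ∀ v ∈ tL, v ∉ seen := by
        intro v hv hvs
        exact (List.disjoint_of_nodup_append hnd) ((hseen v).1 hvs) hv
      refine ⟨[], by simp, ?_, ?_, by intro h; simp at h⟩
      · simp only [List.nil_append]
        exact pvOrbitA_good (f + 1) seen hg hdisj ((List.nodup_append.1 hnd).2.1)
      · intro t fl h
        injection h with h1 _
        rw [List.nil_append, ← h1]
        exact hg
    | none =>
      by_cases h1 : x = 1
      · refine ⟨[x], by simp [h1], ?_, by intro t fl h; simp [h1] at h, ?_⟩
        · rw [pvOrbitLoopA]; simp [h1]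
        · intro _; exact ⟨rfl, h1⟩
      · by_cases h2 : x ∈ seen
        · have hc : PySem.Set.contains seen x = true := by simpa using h2
          refine ⟨[x], by simp [h1, h2], ?_, ?_, ?_⟩
          · rw [pvOrbitLoopA]; simp [h1, h2]
          · intro t fl h; simp [h1, h2] at h
          · intro h; simp [h1, h2] at h
        · have hc : PySem.Set.contains seen x = false := by simpa using h2
          have hpre' : pvPre x0 (path ++ [x]) (pvHalveB (3 * x + 1)) := by
            rw [← pvHalve_eq]
            exact pvPre_snoc hpre h1
          have hseen' : ∀ v, v ∈ PySem.Set.add seen x ↔ v ∈ path ++ [x] := by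
            intro v
            rw [PySem.Set.mem_add]
            simp [hseen v, or_comm]
          obtain ⟨q, hq1, hq2, hq3, hq4⟩ :=
            ih (pvHalveB (3 * x + 1)) (PySem.Set.add seen x) (path ++ [x]) memo hInv hpre' hseen'
          have hsyr : pvHalveB (3 * x + 1) = pvSyracuseA x := (pvHalve_eq _).symm
          refine ⟨x :: q, ?_, ?_, ?_, ?_⟩
          · simp only [if_neg h1, hc, Bool.false_eq_true, if_false]
            rw [hq1]; simp
          · rw [pvOrbitLoopA]
            simp only [if_neg h1, hc, Bool.false_eq_true, if_false, List.nil_append]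
            rw [pvOrbitLoopA_acc, hsyr] at hq2 ⊢
            simp only [List.nil_append] at hq2
            simp [hq2]
          · intro t fl h
            simp only [if_neg h1, hc, Bool.false_eq_true, if_false] at h
            have := hq3 t fl h
            rw [hsyr] at this
            exact pvGood_cons h1 (by simpa using this)
          · intro h
            simp only [if_neg h1, hc, Bool.false_eq_true, if_false] at h
            have := hq4 h
            rw [hsyr] at this
            exact pvGood_cons h1 this

theorem pvStep_eq : pvStepB = pvStepA := rfl

-- one outer iteration: A's tally over its regenerated-and-sliced orbit equals B's tally
-- over the spliced orbit, and the memo invariant is preserved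
theorem pvStart_spec (n0 m mod : Int) (memo : PySem.Dict Int (List Int))
    (freq : PySem.Dict Int Int) (total : Int) (hInv : pvInv memo)
    (hodd : PySem.Int.mod n0 2 = 1) :
    (PySem.List.slice (pvCollatzOrbitOddA n0 m) none (some m)).foldl (pvStepA mod) (freq, total)
      = ((pvStartB n0 m.toNat mod memo freq total).2.1,
         (pvStartB n0 m.toNat mod memo freq total).2.2)
    ∧ pvInv (pvStartB n0 m.toNat mod memo freq total).1 := by
  have hodd' : ¬ PySem.Int.mod n0 2 = 0 := by rw [hodd]; norm_num
  have hA : pvCollatzOrbitOddA n0 m = pvOrbitLoopA m.toNat n0 PySem.Set.empty [] := by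
    unfold pvCollatzOrbitOddA
    rw [if_neg hodd']
  obtain ⟨q, hq1, hq2, hq3, hq4⟩ :=
    pvWalk_spec n0 m.toNat n0 PySem.Set.empty [] memo hInv rfl (by intro v; simp [PySem.Set.empty])
  rw [pvSlice_id, hA, hq2]
  unfold pvStartB
  simp only [hq1, List.nil_append, pvStep_eq]
  constructor
  · match h : (pvWalkB m.toNat n0 PySem.Set.empty [] memo).2 with
    | .fuelOut => simp
    | .hitOne => simp
    | .hitSeen => simp
    | .hitMemo t fl => simp
  · match h : (pvWalkB m.toNat n0 PySem.Set.empty [] memo).2 with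
    | .fuelOut => simpa using hInv
    | .hitSeen => simpa using hInv
    | .hitOne =>
      simp only
      apply pvCacheB_inv _ _ _ hInv ⟨[], by simp⟩
      intro hne
      have hg := hq4 h
      obtain ⟨L', hL'⟩ := pvGood_head hg
      rw [hL']
      rw [hL'] at hg
      simpa using hg
    | .hitMemo t fl =>
      simp only
      apply pvCacheB_inv _ _ _ hInv ⟨t, rfl⟩
      intro hne
      have hg := hq3 t fl h
      obtain ⟨L', hL'⟩ := pvGood_head hg
      rw [hL'] at hg ⊢
      simpa using hg

-- the whole outer loop, by induction over the list of start values
theorem pvFold_eq (mod m : Int) : ∀ (xs : List Int) (freq : PySem.Dict Int Int) (total : Int)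
    (memo : PySem.Dict Int (List Int)), pvInv memo → (∀ a ∈ xs, PySem.Int.mod a 2 = 1) →
    xs.foldl (fun (st : PySem.Dict Int Int × Int) (n0 : Int) =>
        (PySem.List.slice (pvCollatzOrbitOddA n0 m) none (some m)).foldl (pvStepA mod) st)
      (freq, total)
    = ((xs.foldl (fun (st : PySem.Dict Int (List Int) × PySem.Dict Int Int × Int) (n0 : Int) =>
          pvStartB n0 m.toNat mod st.1 st.2.1 st.2.2) (memo, freq, total)).2.1,
       (xs.foldl (fun (st : PySem.Dict Int (List Int) × PySem.Dict Int Int × Int) (n0 : Int) =>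
          pvStartB n0 m.toNat mod st.1 st.2.1 st.2.2) (memo, freq, total)).2.2) := by
  intro xs
  induction xs with
  | nil => intro freq total memo _ _; rfl
  | cons a xs ih =>
    intro freq total memo hInv hodd
    simp only [List.foldl_cons]
    obtain ⟨heq, hInv'⟩ := pvStart_spec a m mod memo freq total hInv (hodd a (by simp))
    rw [heq]
    exact ih _ _ _ hInv' (fun b hb => hodd b (by simp [hb]))

theorem pvRange_odd (N : Int) : ∀ a ∈ PySem.List.pyRange 3 (N + 1) 2, PySem.Int.mod a 2 = 1 := by
  intro a ha
  rw [PySem.List.mem_pyRange_iff_of_pos (by norm_num : (0:Int) < 2) a] at ha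
  obtain ⟨h1, h2, k, hk⟩ := ha
  rw [PySem.Int.mod_eq_emod_of_pos (by norm_num)]
  omega

-- ===== VERDICT (by name: the statement is the Claim_ definition above) =====
theorem compute_measure_first_k_steps_spec : Claim_equal_compute_measure_first_k_steps := by
  intro N_max mod_k max_orbit_len _ _
  unfold Spec_compute_measure_first_k_steps
  unfold compute_measure_first_k_steps compute_measure_first_k_steps_alt
  dsimp only
  rw [pvFold_eq (2 ^ mod_k.toNat) max_orbit_len (PySem.List.pyRange 3 (N_max + 1) 2)
      PySem.Dict.empty 0 PySem.Dict.empty (by intro x L h; simp [PySem.Dict.get?_empty] at h)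
      (pvRange_odd N_max)]
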